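-- pv_equiv track=rewrite | github.com/stripesinterview/patreon_interview | Patreon Interview.py | cd
-- ===== SOURCE A (Python) =====
-- def cd(current, new):
--     current = current.strip("/")
--     path_so_far = [] if (current == "") else current.split("/")
--     parts = new.split("/")
--     for part in parts:
--         if not part:
--             continue
--         if part == "..":
--             if path_so_far:
--                 path_so_far.pop()
--         elif part == ".":
--             continue
--         else:
--             path_so_far.append(part)
--     result = "/".join(path_so_far)
--     return "/" + result
-- ===== SOURCE B (Python) =====
-- def cd(current, new):
--     current = current.strip("/")
--     cur = [] if current == "" else current.split("/")
--     skip = 0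
--     kept = []
--     for part in reversed(new.split("/")):
--         if not part or part == ".":
--             continue
--         if part == "..":
--             skip += 1
--         elif skip != 0:
--             skip -= 1
--         else:
--             kept.append(part)
--     kept.reverse()
--     keep = cur[:len(cur) - min(skip, len(cur))]
--     return "/" + "/".join(keep + kept)
-- ===== Notes on version B (the rewrite author's own statement) =====
-- stated objective: alternative
-- what changed: Replaced the left-to-right mutable stack (pop on '..', append on name) by a right-to-left single scan over new's components keeping only an integer skip counter and the surviving names, then trimming min(skip, len) components off the current path at once.
import Mathlib
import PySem

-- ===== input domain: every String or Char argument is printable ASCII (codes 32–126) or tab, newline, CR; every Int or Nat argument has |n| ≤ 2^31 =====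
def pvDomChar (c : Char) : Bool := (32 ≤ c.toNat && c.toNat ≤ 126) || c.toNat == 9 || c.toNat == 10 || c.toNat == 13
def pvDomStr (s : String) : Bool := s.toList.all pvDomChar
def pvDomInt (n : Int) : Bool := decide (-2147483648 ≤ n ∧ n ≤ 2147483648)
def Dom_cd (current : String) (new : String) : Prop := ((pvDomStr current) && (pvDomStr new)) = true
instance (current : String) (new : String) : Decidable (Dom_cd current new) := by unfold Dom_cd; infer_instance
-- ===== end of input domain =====

-- B processes new's components right-to-left with a skip counter instead of A's pop/append stack; same result, same cost (objective: alternative).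

-- ===== PORT A =====
-- s.split("/") with a nonempty separator always returns a value (split? is none only for sep = "")
def splitSlash (s : String) : List String := (PySem.Str.split? s "/").getD []

-- one loop iteration of A: the stack update for one component
def cdStep (st : List String) (part : String) : List String :=
  if part = "" then st
  else if part = ".." then (if st ≠ [] then st.dropLast else st)
  else if part = "." then st
  else st ++ [part]

def cd (current : String) (new : String) : String :=
  let current := PySem.Str.stripChars current "/"
  let pathSoFar : List String := if current = "" then [] else splitSlash current
  let parts := splitSlash new
  let res := parts.foldl cdStep pathSoFar
  "/" ++ PySem.Str.join "/" res

-- ===== PORT B =====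
-- one reverse-scan step of B: (skip counter, names kept so far in reverse-scan order)
def cdAltStep (acc : Nat × List String) (part : String) : Nat × List String :=
  if part = "" ∨ part = "." then acc
  else if part = ".." then (acc.1 + 1, acc.2)
  else if acc.1 ≠ 0 then (acc.1 - 1, acc.2)
  else (acc.1, acc.2 ++ [part])

def cd_alt (current : String) (new : String) : String :=
  let current := PySem.Str.stripChars current "/"
  let cur : List String := if current = "" then [] else splitSlash current
  let scan := (splitSlash new).reverse.foldl cdAltStep (0, [])
  let kept := scan.2.reverse
  let keep := cur.take (cur.length - min scan.1 cur.length)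
  "/" ++ PySem.Str.join "/" (keep ++ kept)

-- ===== PRECONDITION & SPEC =====
def Spec_cd (current : String) (new : String) (out : String) : Prop := out = cd_alt current new
instance (current : String) (new : String) (out : String) : Decidable (Spec_cd current new out) := by unfold Spec_cd; infer_instance

-- ===== CLAIM (what is proved, stated in full; the proofs are below) =====
def Claim_equal_cd : Prop := ∀ (current : String) (new : String), Dom_cd current new → Spec_cd current new (cd current new)

-- ===== LEMMAS AND PROOFS =====

-- B's scan written as a foldr (what foldl over the reversed list computes)
def cdBStep (part : String) (acc : Nat × List String) : Nat × List String := cdAltStep acc part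

-- take of an appended singleton within bounds
theorem take_append_singleton (l : List String) (p : String) (m : Nat) (h : m ≤ l.length) :
    (l ++ [p]).take m = l.take m := List.take_append_of_le_length h

theorem take_dropLast (l : List String) (m : Nat) (h : m ≤ l.length - 1) :
    l.dropLast.take m = l.take m := by
  rw [List.dropLast_eq_take, List.take_take]
  congr 1
  omega

-- the core invariant: A's stack fold equals B's trim-then-append, for ANY starting stack
theorem fold_eq (parts : List String) : ∀ (cur : List String),
    parts.foldl cdStep cur =
      cur.take (cur.length - min (parts.foldr cdBStep (0, [])).1 cur.length) ++
        (parts.foldr cdBStep (0, [])).2.reverse := by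
  induction parts with
  | nil => intro cur; simp
  | cons p ps ih =>
    intro cur
    rw [List.foldl_cons, List.foldr_cons, ih (cdStep cur p)]
    set acc := ps.foldr cdBStep (0, []) with hacc
    obtain ⟨s, k⟩ := acc
    by_cases h0 : p = ""
    · simp [cdStep, cdBStep, cdAltStep, h0]
    · by_cases h1 : p = ".."
      · subst h1
        have hA : cdStep cur ".." = (if cur ≠ [] then cur.dropLast else cur) := by
          simp [cdStep]
        have hB : cdBStep ".." (s, k) = (s + 1, k) := by simp [cdBStep, cdAltStep]
        rw [hA, hB]
        by_cases hc : cur = []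
        · subst hc; simp
        · rw [if_pos hc]
          congr 1
          have hle : cur.dropLast.length - min s cur.dropLast.length ≤ cur.length - 1 := by
            simp [List.length_dropLast]
          rw [take_dropLast cur _ hle]
          congr 1
          have hlen : cur.length ≠ 0 := fun h => hc (List.eq_nil_of_length_eq_zero h)
          simp only [List.length_dropLast]
          omega
      · by_cases h2 : p = "."
        · subst h2
          simp [cdStep, cdBStep, cdAltStep]
        · have hA : cdStep cur p = cur ++ [p] := by simp [cdStep, h0, h1, h2]
          have hB : cdBStep p (s, k) = if s ≠ 0 then (s - 1, k) else (s, k ++ [p]) := by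
            simp [cdBStep, cdAltStep, h0, h1, h2]
          rw [hA, hB]
          by_cases hs : s = 0
          · subst hs
            simp [List.take_of_length_le]
          · rw [if_pos hs]
            simp only [List.length_append, List.length_cons, List.length_nil]
            congr 1
            rw [take_append_singleton cur p _ (by omega)]
            congr 1
            omega

-- B's reverse foldl is the foldr of the core invariant
theorem lists_eq (parts : List String) (cur : List String) :
    parts.foldl cdStep cur =
      cur.take (cur.length - min (parts.reverse.foldl cdAltStep (0, [])).1 cur.length) ++
        (parts.reverse.foldl cdAltStep (0, [])).2.reverse := by
  rw [List.foldl_reverse]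
  exact fold_eq parts cur

-- ===== VERDICT (by name: the statement is the Claim_ definition above) =====
theorem cd_spec : Claim_equal_cd := by
  intro current new _
  show cd current new = cd_alt current new
  exact congrArg (fun l => "/" ++ PySem.Str.join "/" l)
    (lists_eq (splitSlash new)
      (if PySem.Str.stripChars current "/" = "" then [] else splitSlash (PySem.Str.stripChars current "/")))
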